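-- pv_equiv track=rewrite | github.com/bastiannispel/advent-of-code | src/day_5.py | parse_matrix
-- ===== SOURCE A (Python) =====
-- def parse_matrix(data:str):
--     n_cols = (len(data[0])+1)//4
--     matrix=[[] for _ in range(n_cols)]
--     n_rows = len(data)-1
--     for n_row in range(n_rows):
--         for i,item in enumerate(data[n_row][1::4]):
--             if item != " ":
--                 matrix[i].append(item)
--     matrix = [row[::-1] for row in matrix]
--     return matrix
-- ===== SOURCE B (Python) =====
-- def parse_matrix(data):
--     n_cols = (len(data[0]) + 1) // 4
--     cols = {}
--     for line in reversed(data[:-1]):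
--         for idx, ch in enumerate(line):
--             if idx % 4 == 1 and ch != " ":
--                 cols.setdefault((idx - 1) // 4, []).append(ch)
--     return [cols.get(c, []) for c in range(n_cols)]
-- ===== Notes on version B (the rewrite author's own statement) =====
-- stated objective: alternative
-- what changed: B replaces A's stride-slice per row with preallocated per-column lists (append then reverse) by a single bottom-to-top scan of every character, filtering positions by idx % 4 == 1 and grouping letters into a dictionary keyed by (idx-1)//4, emitted at the end for the first n_cols keys.
-- outside the precondition, e.g. on parse_matrix([]): A raises IndexError, B raises IndexError; on parse_matrix([' 1 ', '[A] [B]', 'x']): A raises IndexError, B returns [['A', '1']]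
import Mathlib
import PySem

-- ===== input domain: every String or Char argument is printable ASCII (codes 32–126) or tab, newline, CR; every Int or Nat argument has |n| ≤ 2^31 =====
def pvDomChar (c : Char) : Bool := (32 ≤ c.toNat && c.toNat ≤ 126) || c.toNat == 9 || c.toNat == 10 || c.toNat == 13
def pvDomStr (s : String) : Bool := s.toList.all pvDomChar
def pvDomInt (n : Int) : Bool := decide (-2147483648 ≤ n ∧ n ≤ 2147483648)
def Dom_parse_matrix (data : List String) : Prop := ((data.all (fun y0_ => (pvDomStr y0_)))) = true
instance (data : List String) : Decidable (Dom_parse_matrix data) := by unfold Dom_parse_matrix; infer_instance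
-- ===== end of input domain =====

-- B re-implements the crate-stack parse by a single bottom-to-top scan of every character of the
-- non-last lines, filtering positions by idx % 4 == 1 and grouping letters into a dictionary keyed
-- by (idx-1)//4, emitted for the first n_cols keys — instead of A's per-row stride slice into
-- preallocated per-column lists that are appended top-down and reversed (objective: alternative).

-- ===== PORT A =====
-- line[1::4] as a list of chars
def pvStride (cs : List Char) : List Char := (PySem.Chars.slice? cs (some 1) none 4).getD []

-- body of A's inner loop: 'if item != " ": matrix[i].append(item)' (out-of-range append is A's
-- IndexError; the port's pySetD no-ops there, those inputs are outside Pre_)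
def pvStep (m : List (List String)) (p : Int × Char) : List (List String) :=
  if p.2 ≠ ' ' then
    PySem.List.pySetD m p.1 (PySem.List.pyGetD m p.1 [] ++ [String.ofList [p.2]])
  else m

def parse_matrix (data : List String) : List (List String) :=
  let n_cols : Int := PySem.Int.floordiv (PySem.Str.len (PySem.List.pyGetD data 0 "") + 1) 4
  let matrix : List (List String) := (PySem.List.pyRange 0 n_cols 1).map (fun _ => [])
  let n_rows : Int := (data.length : Int) - 1
  let matrix := (PySem.List.pyRange 0 n_rows 1).foldl
    (fun m r =>
      (PySem.List.enumerate (pvStride (PySem.List.pyGetD data r "").toList) 0).foldl pvStep m)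
    matrix
  matrix.map (fun row => row.reverse)   -- row[::-1]

-- ===== PORT B =====
-- body of B's inner loop: 'if idx % 4 == 1 and ch != " ": cols.setdefault((idx-1)//4, []).append(ch)'
-- (setdefault-then-append is Dict.modify with default [], per the PySem Dict API)
def pvBStep (d : PySem.Dict Int (List String)) (p : Int × Char) : PySem.Dict Int (List String) :=
  if PySem.Int.mod p.1 4 = 1 ∧ p.2 ≠ ' ' then
    d.modify (PySem.Int.floordiv (p.1 - 1) 4) [] (fun l => l ++ [String.ofList [p.2]])
  else d

def parse_matrix_alt (data : List String) : List (List String) :=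
  let n_cols : Int := PySem.Int.floordiv (PySem.Str.len (PySem.List.pyGetD data 0 "") + 1) 4
  let cols : PySem.Dict Int (List String) :=
    ((PySem.List.slice data none (some (-1))).reverse).foldl
      (fun d line => (PySem.List.enumerate line.toList 0).foldl pvBStep d)
      PySem.Dict.empty
  (PySem.List.pyRange 0 n_cols 1).map (fun c => cols.getD c [])

-- ===== PRECONDITION & SPEC =====
-- every crate letter of a non-last line at a column index ≥ n_cols is a space
def pvRowsOk (data : List String) : Bool :=
  data.dropLast.all (fun line =>
    ((pvStride line.toList).drop (((data.headD "").toList.length + 1) / 4)).all (· == ' '))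

-- Pre_ excludes exactly the inputs on which A raises IndexError: empty data (data[0]) and rows
-- holding a non-space crate char at a column index ≥ n_cols (matrix[i].append out of range)
def Pre_parse_matrix (data : List String) : Prop := data ≠ [] ∧ pvRowsOk data = true

instance (data : List String) : Decidable (Pre_parse_matrix data) := by
  unfold Pre_parse_matrix; infer_instance

def pvWitness_parse_matrix : List String := ["[A]", "[B]", " 1 "]

def Spec_parse_matrix (data : List String) (out : List (List String)) : Prop := out = parse_matrix_alt data
instance (data : List String) (out : List (List String)) : Decidable (Spec_parse_matrix data out) := by unfold Spec_parse_matrix; infer_instance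

-- ===== CLAIM (what is proved, stated in full; the proofs are below) =====
def Claim_equal_parse_matrix : Prop := ∀ (data : List String), Dom_parse_matrix data → Pre_parse_matrix data → Spec_parse_matrix data (parse_matrix data)

-- ===== LEMMAS AND PROOFS =====

-- the c-th element of line[1::4] is the char at absolute position 4c+1
theorem pvStride_get (cs : List Char) (c : Nat) : (pvStride cs)[c]? = cs[4*c+1]? := by
  unfold pvStride
  rw [PySem.Chars.slice?_eq_listSlice?]
  rcases cs with _ | ⟨x, xs⟩
  · simp [PySem.List.slice?, PySem.List.sliceIndices]
  · simp only [PySem.List.slice?, PySem.List.sliceIndices, if_neg (by norm_num : ¬(4:Int) = 0),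
      if_neg (by norm_num : ¬(4:Int) < 0), if_pos (by norm_num : (0:Int) < 4), if_neg (by norm_num : ¬(1:Int) < 0)]
    simp only [List.length_cons, Option.getD_some]
    rw [show ((xs.length + 1 : Nat) : Int) = (xs.length:Int)+1 by push_cast; ring]
    rw [show min (1:Int) ((xs.length:Int)+1) = 1 from min_eq_left (by omega)]
    have hcnt : ((((xs.length:Int) + 1) - 1 + 4 - 1) / 4).toNat = (xs.length+3)/4 := by
      rw [show ((xs.length:Int) + 1 - 1 + 4 - 1) = ((xs.length+3 : Nat) : Int) by push_cast; ring]
      rw [show ((4:Int)) = ((4:Nat):Int) by norm_num, ← Int.natCast_div, Int.toNat_natCast]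
    by_cases hlt : (1:Int) < (xs.length:Int)+1
    · rw [if_pos hlt, hcnt]
      rw [List.filterMap_congr (g := fun k => some ((x::xs).getD (1+4*k) ' ')) ?_]
      · rw [show (fun k => some ((x::xs).getD (1+4*k) ' ')) = some ∘ (fun k => ((x::xs).getD (1+4*k) ' ')) from rfl,
          List.filterMap_eq_map, List.getElem?_map]
        by_cases hc : c < (xs.length+3)/4
        · rw [List.getElem?_range hc]
          have hr : 4*c+1 < (x::xs).length := by simp; omega
          rw [List.getElem?_eq_getElem hr]
          simp only [Option.map_some, Option.some.injEq]
          rw [List.getD_eq_getElem _ _ (by simp; omega : 1+4*c < (x::xs).length)]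
          congr 1
          omega
        · rw [List.getElem?_eq_none (by simpa using hc), List.getElem?_eq_none (by simp; omega)]
          simp
      · intro k hk
        rw [List.mem_range] at hk
        have hidx : ((1:Int) + 4 * (k:Int)).toNat = 1 + 4*k := by omega
        have hik : 1+4*k < (x::xs).length := by simp; omega
        rw [hidx, List.getElem?_eq_getElem hik]
        show some ((x::xs)[1+4*k]'hik) = some ((x::xs).getD (1+4*k) ' ')
        rw [List.getD_eq_getElem _ _ hik]
    · rw [if_neg hlt]
      have hx : xs = [] := List.length_eq_zero_iff.mp (by omega)
      subst hx
      simp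

-- the singleton-or-empty contribution of the char at absolute position i
def pvPickAt (cs : List Char) (i : Nat) : List String :=
  match cs[i]? with
  | some ch => if ch ≠ ' ' then [String.ofList [ch]] else []
  | none => []

theorem pvPickAt_nil (i : Nat) : pvPickAt [] i = [] := by simp [pvPickAt]

theorem pvPickAt_cons_pos (x : Char) (xs : List Char) (i : Nat) (h : 0 < i) :
    pvPickAt (x :: xs) i = pvPickAt xs (i-1) := by
  rcases i with _ | j
  · omega
  · simp [pvPickAt]

-- B's inner loop over one line: the dict entry at column c grows by exactly the char at
-- absolute position 4c+1 (when non-space), independently of everything else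
theorem pvInner (cs : List Char) : ∀ (s : Nat) (d : PySem.Dict Int (List String)) (c : Nat),
    PySem.Dict.getD ((PySem.List.enumerate cs (s:Int)).foldl pvBStep d) (c:Int) [] =
      PySem.Dict.getD d (c:Int) [] ++ (if s ≤ 4*c+1 then pvPickAt cs (4*c+1-s) else []) := by
  induction cs with
  | nil =>
    intro s d c
    simp [PySem.List.enumerate_nil, pvPickAt_nil]
  | cons x xs ih =>
    intro s d c
    rw [PySem.List.enumerate_cons, List.foldl_cons]
    have hcast : (s : Int) + 1 = ((s + 1 : Nat) : Int) := by push_cast; ring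
    have hmodiff : PySem.Int.mod (s:Int) 4 = 1 ↔ s % 4 = 1 := by
      rw [PySem.Int.mod_eq_emod_of_pos (by norm_num)]; omega
    by_cases hcond : s % 4 = 1 ∧ x ≠ ' '
    · have hstep : pvBStep d ((s:Int), x) =
          d.modify (((s-1)/4 : Nat) : Int) [] (fun l => l ++ [String.ofList [x]]) := by
        have hK : PySem.Int.floordiv ((s:Int) - 1) 4 = (((s-1)/4 : Nat) : Int) := by
          rw [show ((s:Int) - 1) = ((s-1 : Nat) : Int) by omega,
            show ((4:Int)) = ((4:Nat):Int) by norm_num]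
          exact PySem.Int.floordiv_natCast _ _
        simp only [pvBStep, if_pos (show PySem.Int.mod (s:Int) 4 = 1 ∧ x ≠ ' ' from ⟨hmodiff.mpr hcond.1, hcond.2⟩)]
        rw [hK]
      rw [hstep, hcast, ih]
      have hdm := Nat.div_add_mod (s-1) 4
      by_cases hs : s = 4*c+1
      · have hkey : (c:Int) = (((s-1)/4 : Nat) : Int) := by
          have : (s-1)/4 = c := by omega
          rw [this]
        rw [hkey, PySem.Dict.getD_modify_self,
          if_pos (by omega : s ≤ 4*c+1), if_neg (by omega : ¬ s+1 ≤ 4*c+1)]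
        have h0 : 4*c+1-s = 0 := by omega
        rw [h0]
        simp [pvPickAt, hcond.2]
      · have hnec : (s-1)/4 ≠ c := by omega
        rw [PySem.Dict.getD_modify_of_ne _ _ _ (fun h => hnec (Int.natCast_inj.mp h).symm)]
        by_cases hlt : s ≤ 4*c+1
        · rw [if_pos hlt, if_pos (by omega : s+1 ≤ 4*c+1),
            pvPickAt_cons_pos _ _ _ (by omega)]
          congr 2
        · rw [if_neg hlt, if_neg (by omega)]
    · have hstep : pvBStep d ((s:Int), x) = d := by
        simp only [pvBStep]
        rw [if_neg (by rw [hmodiff]; tauto)]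
      rw [hstep, hcast, ih]
      by_cases hs : s = 4*c+1
      · have hx : x = ' ' := by
          by_contra hx
          exact hcond ⟨by omega, hx⟩
        rw [if_pos (by omega : s ≤ 4*c+1), if_neg (by omega : ¬ s+1 ≤ 4*c+1)]
        have : 4*c+1-s = 0 := by omega
        rw [this]
        simp [pvPickAt, hx]
      · by_cases hlt : s ≤ 4*c+1
        · rw [if_pos hlt, if_pos (by omega : s+1 ≤ 4*c+1),
            pvPickAt_cons_pos _ _ _ (by omega)]
          congr 2
        · rw [if_neg hlt, if_neg (by omega)]

-- B's outer loop: the dict entry at column c is the concatenation of the per-line contributions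
theorem pvOuter (rs : List String) (d : PySem.Dict Int (List String)) (c : Nat) :
    PySem.Dict.getD
      (rs.foldl (fun d line => (PySem.List.enumerate line.toList 0).foldl pvBStep d) d) (c:Int) [] =
      PySem.Dict.getD d (c:Int) [] ++ rs.flatMap (fun line => pvPickAt line.toList (4*c+1)) := by
  induction rs generalizing d with
  | nil => simp
  | cons r rs ih =>
    rw [List.foldl_cons, ih]
    have h0 := pvInner r.toList 0 d c
    simp only [Nat.cast_zero, Nat.sub_zero, if_pos (Nat.zero_le _)] at h0
    rw [h0, List.flatMap_cons, List.append_assoc]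

-- ===== A-side machinery (pvZip characterises A's row-major append loop) =====
def pvZip : List (List String) → List Char → List (List String)
  | as, [] => as
  | [], _ :: _ => []
  | a :: as, x :: xs => (if x ≠ ' ' then a ++ [String.ofList [x]] else a) :: pvZip as xs
theorem pvZip_nil_right (as : List (List String)) : pvZip as [] = as := by cases as <;> rfl
theorem pvZip_nil_left (xs : List Char) : pvZip [] xs = [] := by cases xs <;> rfl
theorem pvStep_eq (acc : List (List String)) (s : Nat) (x : Char) :
    pvStep acc ((s : Int), x) =
      if x ≠ ' ' then acc.set s (acc.getD s [] ++ [String.ofList [x]]) else acc := by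
  simp [pvStep]
theorem pvEnumFold (row : List Char) (acc : List (List String)) (s : Nat) :
    (PySem.List.enumerate row (s : Int)).foldl pvStep acc =
      acc.take s ++ pvZip (acc.drop s) row := by
  induction row generalizing acc s with
  | nil => simp [PySem.List.enumerate, pvZip_nil_right]
  | cons x xs ih =>
    rw [PySem.List.enumerate_cons, List.foldl_cons]
    have hcast : (s : Int) + 1 = ((s + 1 : Nat) : Int) := by push_cast; ring
    rw [hcast, ih]
    by_cases hs : s < acc.length
    · have hdrop : acc.drop s = acc[s] :: acc.drop (s+1) := List.drop_eq_getElem_cons hs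
      rw [pvStep_eq, hdrop]
      have hlen : (acc.take s).length = s := by simp [List.length_take]; omega
      have hset : ∀ v : List String, (acc.set s v).take (s+1) = acc.take s ++ [v] := by
        intro v
        rw [List.set_eq_take_append_cons_drop, if_pos hs]
        rw [show s + 1 = (acc.take s).length + 1 by omega]
        rw [List.take_append]
        simp
      have hsetd : ∀ v : List String, (acc.set s v).drop (s+1) = acc.drop (s+1) := by
        intro v; exact List.drop_set_of_lt (by omega)
      have hg : acc.getD s [] = acc[s] := List.getD_eq_getElem acc [] hs
      by_cases hx : x ≠ ' '
      · simp only [if_pos hx]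
        rw [hset, hsetd, hg, pvZip]
        simp [hx]
      · simp only [if_neg hx]
        simp only [not_not] at hx
        subst hx
        rw [pvZip, if_neg (by simp), List.take_succ_eq_append_getElem hs,
            List.append_assoc, List.singleton_append]
    · rw [not_lt] at hs
      have h1 : pvStep acc ((s:Int), x) = acc := by
        rw [pvStep_eq]; split <;> simp [List.set_eq_of_length_le hs]
      rw [h1, List.take_of_length_le hs, List.take_of_length_le (by omega),
          List.drop_eq_nil_of_le hs, List.drop_eq_nil_of_le (by omega),
          pvZip_nil_left, pvZip_nil_left]

def pvCol (rows : List (List Char)) (c : Nat) : List String :=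
  rows.filterMap (fun row =>
    if c < row.length ∧ row.getD c ' ' ≠ ' ' then some (String.ofList [row.getD c ' ']) else none)

theorem pvZip_get (as : List (List String)) (xs : List Char) (c : Nat) :
    (pvZip as xs)[c]? =
      as[c]?.map (fun a =>
        if c < xs.length ∧ xs.getD c ' ' ≠ ' ' then a ++ [String.ofList [xs.getD c ' ']] else a) := by
  induction as generalizing xs c with
  | nil => simp [pvZip_nil_left]
  | cons a as ih =>
    cases xs with
    | nil => simp [pvZip_nil_right]
    | cons x xs' =>
      cases c with
      | zero => simp [pvZip]
      | succ c' => simpa [pvZip] using ih xs' c'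

theorem pvRowsFold_get (rows : List (List Char)) (acc : List (List String)) (c : Nat) :
    (rows.foldl pvZip acc)[c]? = acc[c]?.map (fun a => a ++ pvCol rows c) := by
  induction rows generalizing acc with
  | nil => simp [pvCol]
  | cons r rs ih =>
    rw [List.foldl_cons, ih, pvZip_get]
    simp only [Option.map_map, pvCol, List.filterMap_cons]
    cases h : acc[c]? with
    | none => simp
    | some a =>
      simp only [Option.map_some, Function.comp]
      split <;> simp

theorem pvProcessRow (m : List (List String)) (cs : List Char) :
    (PySem.List.enumerate cs 0).foldl pvStep m = pvZip m cs := by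
  simpa using pvEnumFold cs m 0

-- bridge: the option A reads from a stride row equals B's contribution from the raw line
theorem pvCol_elem_eq_pick (cs : List Char) (c : Nat) :
    ((if c < (pvStride cs).length ∧ (pvStride cs).getD c ' ' ≠ ' '
       then some (String.ofList [(pvStride cs).getD c ' ']) else none) : Option String).toList =
      pvPickAt cs (4*c+1) := by
  unfold pvPickAt
  rw [← pvStride_get]
  cases h : (pvStride cs)[c]? with
  | none =>
    have hge : ¬ c < (pvStride cs).length := by
      intro hlt
      rw [List.getElem?_eq_getElem hlt] at h
      simp at h
    rw [if_neg (by tauto)]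
    rfl
  | some ch =>
    have hlt : c < (pvStride cs).length := by
      by_contra hge
      rw [List.getElem?_eq_none (by omega)] at h
      simp at h
    have hgd : (pvStride cs).getD c ' ' = ch := by
      rw [List.getD_eq_getElem _ _ hlt]
      rw [List.getElem?_eq_getElem hlt] at h
      exact Option.some.inj h
    rw [hgd]
    by_cases hch : ch ≠ ' '
    · rw [if_pos ⟨hlt, hch⟩]; simp [hch]
    · rw [if_neg (by tauto)]; simp at hch; simp [hch]

theorem main_eq (data : List String) (hne : data ≠ []) :
    parse_matrix data = parse_matrix_alt data := by
  unfold parse_matrix parse_matrix_alt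
  set m0 : Nat := (PySem.List.pyGetD data 0 "").toList.length with hm0
  have hN : PySem.Int.floordiv (PySem.Str.len (PySem.List.pyGetD data 0 "") + 1) 4
      = (((m0 + 1) / 4 : Nat) : Int) := by
    rw [PySem.Str.len_eq, ← hm0]
    exact_mod_cast PySem.Int.floordiv_natCast (m0 + 1) 4
  set N : Nat := (m0 + 1) / 4 with hNdef
  set rows : List (List Char) := data.dropLast.map (fun l => pvStride l.toList) with hrows
  have hinit : ((PySem.List.pyRange 0 ((N : Int)) 1).map (fun _ => ([] : List String)))
      = List.replicate N [] := by
    rw [PySem.List.pyRange_zero_nat, List.map_map]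
    show (List.range N).map (fun _ => ([] : List String)) = List.replicate N []
    simp
  have hlen1 : (data.length : Int) - 1 = (data.dropLast.length : Int) := by
    have : data.length ≠ 0 := fun h => hne (List.eq_nil_of_length_eq_zero h)
    push_cast [List.length_dropLast]
    omega
  have hfold : ∀ init : List (List String),
      (PySem.List.pyRange 0 ((data.length : Int) - 1) 1).foldl
        (fun m r =>
          (PySem.List.enumerate (pvStride (PySem.List.pyGetD data r "").toList) 0).foldl pvStep m)
        init
      = rows.foldl pvZip init := by
    intro init
    rw [hlen1]
    rw [PySem.List.foldl_congr_mem _ _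
      (fun m r => pvZip m (pvStride (PySem.List.pyGetD data.dropLast r "").toList)) init ?_]
    · rw [PySem.List.foldl_pyRange_zero_pyGetD' data.dropLast ""
        (fun m line => pvZip m (pvStride line.toList)) init]
      rw [hrows, List.foldl_map]
    · intro m r hr
      rw [PySem.List.mem_pyRange_one] at hr
      have h1 : PySem.List.pyGetD data r "" = PySem.List.pyGetD data.dropLast r "" := by
        have hrn : r.toNat < data.dropLast.length := by omega
        rw [PySem.List.pyGetD_eq_getElem _ _ hr.1 (by rw [List.length_dropLast] at hrn; omega),
            PySem.List.pyGetD_eq_getElem _ _ hr.1 (by omega),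
            List.getElem_dropLast]
      rw [h1, pvProcessRow]
  simp only [hN, hfold, hinit, PySem.List.slice_to_neg_one]
  -- B's dict entry at column c = reversed column of A
  have hdict : ∀ c : Nat,
      PySem.Dict.getD
        (data.dropLast.reverse.foldl
          (fun d line => (PySem.List.enumerate line.toList 0).foldl pvBStep d)
          PySem.Dict.empty) (c:Int) []
      = (pvCol rows c).reverse := by
    intro c
    rw [pvOuter]
    have hempty : PySem.Dict.getD (PySem.Dict.empty : PySem.Dict Int (List String)) (c:Int) [] = [] := by
      simp
    rw [hempty, List.nil_append]
    unfold pvCol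
    rw [List.filterMap_eq_flatMap_toList, hrows, List.flatMap_map, List.reverse_flatMap]
    -- per-line: the reversed (length ≤ 1) contribution of a stride row = B's pick from the raw line
    have hrev : ∀ (o : Option String), (o.toList).reverse = o.toList := by
      intro o; cases o <;> rfl
    congr 1
    funext l
    simp only [Function.comp, hrev]
    exact (pvCol_elem_eq_pick l.toList c).symm
  apply List.ext_getElem?
  intro c
  rw [List.getElem?_map, pvRowsFold_get]
  rw [PySem.List.pyRange_zero_nat, List.map_map, List.getElem?_map]
  by_cases hc : c < N
  · rw [List.getElem?_replicate, if_pos hc, List.getElem?_range hc]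
    simp only [Option.map_some, Function.comp]
    rw [List.nil_append]
    show some ((pvCol rows c).reverse) = some (PySem.Dict.getD _ ((c:Nat):Int) [])
    rw [hdict c]
  · rw [List.getElem?_replicate, if_neg hc,
      List.getElem?_eq_none (by simpa using hc)]
    simp

theorem pv_spec_aux (data : List String) (hne : data ≠ []) :
    parse_matrix data = parse_matrix_alt data := main_eq data hne

-- ===== VERDICT (by name: the statement is the Claim_ definition above) =====
theorem parse_matrix_spec : Claim_equal_parse_matrix := by
  intro data _ hpre
  unfold Spec_parse_matrix
  exact pv_spec_aux data hpre.1
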